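-- pv_equiv track=rewrite | github.com/FlugBobby/advent-of-code-2019 | day-4/main.py | valid_number_2
-- ===== SOURCE A (Python) =====
-- def valid_number_2(nbr, input_max):
--     consecutive_digits = 1
--     current_group = nbr[0]
--     valid_groups = 0
--     for i in range(1,  len(nbr)):
--         if nbr[i] == nbr[i - 1]:
--             if (nbr[i] == current_group):
--                 consecutive_digits += 1
--             elif consecutive_digits == 2:
--                 valid_groups += 1
--                 current_group = nbr[i]
--                 consecutive_digits = 1
--             else:
--                 current_group = nbr[i]
--                 consecutive_digits = 2
--         elif consecutive_digits == 2 :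
--             valid_groups += 1
--             current_group = nbr[i]
--             consecutive_digits = 1
--         else:
--             consecutive_digits = 1
--     if consecutive_digits == 2:
--         valid_groups += 1
--     if valid_groups == 0:
--         return (False)
--     for i in range(1,  len(nbr)):
--         if nbr[i] < nbr[i - 1]:
--             return (False)
--             consecutive_digits += 1
--     return True
-- ===== SOURCE B (Python) =====
-- def valid_number_2(nbr, input_max):
--     # run-length encode the string, then make the two checks separately
--     runs = []
--     count = 0
--     last = nbr[0]
--     for c in nbr:
--         if c == last:
--             count += 1
--         else:
--             runs.append(count)
--             last = c
--             count = 1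
--     runs.append(count)
--     if 2 not in runs:
--         return False
--     return all(nbr[i] >= nbr[i - 1] for i in range(1, len(nbr)))
-- ===== Notes on version B (the rewrite author's own statement) =====
-- stated objective: simpler
-- what changed: B first run-length-encodes the string into an explicit list of run lengths, then tests '2 in runs' and a separate non-decreasing all() scan, replacing A's inline state machine with current_group/consecutive_digits/valid_groups counters and its early-return second loop.
import Mathlib
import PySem

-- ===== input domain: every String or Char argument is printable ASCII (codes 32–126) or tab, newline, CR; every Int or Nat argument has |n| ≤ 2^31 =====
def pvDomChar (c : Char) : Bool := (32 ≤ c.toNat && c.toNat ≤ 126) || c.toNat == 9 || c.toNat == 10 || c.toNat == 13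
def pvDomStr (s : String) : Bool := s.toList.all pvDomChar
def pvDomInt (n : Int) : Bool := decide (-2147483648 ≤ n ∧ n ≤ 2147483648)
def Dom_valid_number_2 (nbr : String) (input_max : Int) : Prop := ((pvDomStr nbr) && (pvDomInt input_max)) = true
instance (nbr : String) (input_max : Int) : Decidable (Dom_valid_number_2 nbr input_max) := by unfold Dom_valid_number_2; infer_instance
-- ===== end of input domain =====

-- B replaces A's inline run-counting state machine by an explicit run-length encoding
-- followed by a '2 ∈ runs' test and a separate non-decreasing scan (objective: simpler).

-- ===== PORT A =====
-- A's loop is over i = 1..len-1 reading nbr[i-1], nbr[i]; ported as a fold over the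
-- adjacent pairs (l.zip l.tail) with the same (consecutive_digits, current_group,
-- valid_groups) state and the same branch order. nbr[0] raises on the empty string
-- (excluded by Pre_); the [] branch of the match is unreachable under Pre_.
def pvStepA (st : Int × Char × Int) (pc : Char × Char) : Int × Char × Int :=
  if pc.2 == pc.1 then
    if pc.2 == st.2.1 then (st.1 + 1, st.2.1, st.2.2)
    else if st.1 == 2 then (1, pc.2, st.2.2 + 1)
    else (2, pc.2, st.2.2)
  else if st.1 == 2 then (1, pc.2, st.2.2 + 1)
  else (1, st.2.1, st.2.2)

def valid_number_2 (nbr : String) (input_max : Int) : Bool :=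
  match nbr.toList with
  | [] => false
  | c0 :: rest =>
    let pairs := (c0 :: rest).zip rest
    let s := pairs.foldl pvStepA (1, c0, 0)
    let vg := if s.1 == 2 then s.2.2 + 1 else s.2.2
    if vg == 0 then false
    else pairs.all (fun pc => !(decide (pc.2 < pc.1)))

-- ===== PORT B =====
-- B's RLE loop over all characters with (runs, count, last) state, seeded by nbr[0]
-- (which raises on the empty string, hence the unreachable [] branch), then the
-- membership test and the non-decreasing all() over adjacent pairs.
def pvStepB (st : List Int × Int × Char) (c : Char) : List Int × Int × Char :=
  if c == st.2.2 then (st.1, st.2.1 + 1, st.2.2)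
  else (st.1 ++ [st.2.1], 1, c)

def valid_number_2_alt (nbr : String) (input_max : Int) : Bool :=
  match nbr.toList with
  | [] => false
  | c0 :: rest =>
    let l := c0 :: rest
    let st := l.foldl pvStepB ([], 0, c0)
    let runs := st.1 ++ [st.2.1]
    if !(runs.contains 2) then false
    else (l.zip l.tail).all (fun pc => decide (pc.1 ≤ pc.2))

-- ===== PRECONDITION & SPEC =====
-- Pre_ excludes only the empty string, on which A raises IndexError at nbr[0] (B raises there too).
def Pre_valid_number_2 (nbr : String) (input_max : Int) : Prop := nbr ≠ ""
instance (nbr : String) (input_max : Int) : Decidable (Pre_valid_number_2 nbr input_max) := by unfold Pre_valid_number_2; infer_instance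
def pvWitness_valid_number_2 : String × Int := ("1223", 0)

def Spec_valid_number_2 (nbr : String) (input_max : Int) (out : Bool) : Prop := out = valid_number_2_alt nbr input_max
instance (nbr : String) (input_max : Int) (out : Bool) : Decidable (Spec_valid_number_2 nbr input_max out) := by unfold Spec_valid_number_2; infer_instance

-- ===== CLAIM (what is proved, stated in full; the proofs are below) =====
def Claim_equal_valid_number_2 : Prop := ∀ (nbr : String) (input_max : Int), Dom_valid_number_2 nbr input_max → Pre_valid_number_2 nbr input_max → Spec_valid_number_2 nbr input_max (valid_number_2 nbr input_max)

-- ===== LEMMAS AND PROOFS =====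

-- Coupling invariant between A's state machine and B's run-length encoder:
-- cd = count, vg counts the 2s among the completed runs, count ≥ 1, and whenever the
-- current run has length ≥ 2 the stale current_group equals the current character.
lemma pv_loop_eq (rest : List Char) :
    ∀ (prev cg : Char) (cd vg : Int) (runs : List Int) (count : Int),
    cd = count → vg = (runs.count 2 : Int) → 1 ≤ count → (2 ≤ count → cg = prev) →
    (let sA := ((prev :: rest).zip rest).foldl pvStepA (cd, cg, vg)
     let sB := rest.foldl pvStepB (runs, count, prev)
     sA.1 = sB.2.1 ∧ sA.2.2 = (sB.1.count 2 : Int) ∧ 1 ≤ sB.2.1 ∧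
       (2 ≤ sB.2.1 → sA.2.1 = sB.2.2)) := by
  induction rest with
  | nil =>
    intro prev cg cd vg runs count h1 h2 h3 h4
    exact ⟨h1, h2, h3, h4⟩
  | cons c rest ih =>
    intro prev cg cd vg runs count h1 h2 h3 h4
    simp only [List.zip_cons_cons, List.foldl_cons]
    by_cases hc : c = prev
    · subst hc
      -- same character: B increments count; A ends in state (cd+1, c, vg) in every branch
      have hB : pvStepB (runs, count, c) c = (runs, count + 1, c) := by
        simp [pvStepB]
      have hA : pvStepA (cd, cg, vg) (c, c) = (cd + 1, c, vg) := by
        by_cases hcg : c = cg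
        · simp [pvStepA, hcg]
        · -- cg ≠ c forces count = 1 (else invariant gives cg = prev = c), so cd = 1
          have hcount : count = 1 := by
            by_contra hne
            have : 2 ≤ count := by omega
            exact hcg ((h4 this).symm)
          have hcd : cd = 1 := by omega
          simp [pvStepA, hcg, hcd]
      rw [hA, hB]
      have := ih c c (cd + 1) vg runs (count + 1)
        (by omega) h2 (by omega) (by intro; rfl)
      simpa using this
    · -- different character: B closes the run; A adds 1 to vg iff the closed run had length 2
      have hB : pvStepB (runs, count, prev) c = (runs ++ [count], 1, c) := by
        simp [pvStepB, hc]
      have hcoin : (runs ++ [count]).count 2 = runs.count 2 + (if count = 2 then 1 else 0) := by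
        rw [List.count_append]
        congr 1
        by_cases h : count = 2 <;> simp [h]
      by_cases h2c : cd = 2
      · have hA : pvStepA (cd, cg, vg) (prev, c) = (1, c, vg + 1) := by
          simp [pvStepA, hc, h2c, Ne.symm hc]
        rw [hA, hB]
        refine ih c c 1 (vg + 1) (runs ++ [count]) 1 rfl ?_ (by omega) (by intro h; omega)
        have hcount : count = 2 := by omega
        rw [hcoin, if_pos hcount]
        push_cast
        omega
      · have hA : pvStepA (cd, cg, vg) (prev, c) = (1, cg, vg) := by
          simp [pvStepA, hc, h2c, Ne.symm hc]
        rw [hA, hB]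
        refine ih c cg 1 vg (runs ++ [count]) 1 rfl ?_ (by omega) (by intro h; omega)
        have hcount : count ≠ 2 := by omega
        rw [hcoin, if_neg hcount]
        push_cast
        omega

-- not-lt vs le on Char in the two non-decreasing scans
lemma pv_nondec_eq (pairs : List (Char × Char)) :
    pairs.all (fun pc => !(decide (pc.2 < pc.1))) = pairs.all (fun pc => decide (pc.1 ≤ pc.2)) := by
  induction pairs with
  | nil => rfl
  | cons p t ih => simp [List.all_cons, ih, ← decide_not, not_lt]

-- ===== VERDICT (by name: the statement is the Claim_ definition above) =====
theorem valid_number_2_spec : Claim_equal_valid_number_2 := by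
  intro nbr input_max _ _
  unfold Spec_valid_number_2 valid_number_2 valid_number_2_alt
  cases h : nbr.toList with
  | nil => rfl
  | cons c0 rest =>
    simp only [List.foldl_cons, List.tail_cons]
    have hB0 : pvStepB ([], 0, c0) c0 = ([], 1, c0) := by simp [pvStepB]
    rw [hB0]
    have key := pv_loop_eq rest c0 c0 1 0 [] 1 rfl (by simp) (by norm_num)
      (by intro h2; omega)
    obtain ⟨e1, e2, e3, e4⟩ := key
    set sA := ((c0 :: rest).zip rest).foldl pvStepA (1, c0, 0) with hsA
    set sB := rest.foldl pvStepB ([], 1, c0) with hsB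
    have hcount : (if sA.1 == 2 then sA.2.2 + 1 else sA.2.2)
        = (((sB.1 ++ [sB.2.1]).count 2 : Nat) : Int) := by
      rw [List.count_append]
      by_cases h2 : sB.2.1 = (2 : Int)
      · rw [if_pos (by rw [e1, h2]; rfl), e2]
        simp [h2]
      · rw [if_neg (by simp [e1, h2]), e2]
        simp [h2]
    have hmem : ((if sA.1 == 2 then sA.2.2 + 1 else sA.2.2) == 0)
        = !((sB.1 ++ [sB.2.1]).contains 2) := by
      rw [hcount]
      rcases hb : (sB.1 ++ [sB.2.1]).contains 2 with _ | _
      · have hm : (2 : Int) ∉ sB.1 ++ [sB.2.1] := by simpa using hb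
        have hz : (sB.1 ++ [sB.2.1]).count 2 = 0 := List.count_eq_zero.mpr hm
        simp [hz]
      · have hm : (2 : Int) ∈ sB.1 ++ [sB.2.1] := by simpa using hb
        have hpos : 0 < (sB.1 ++ [sB.2.1]).count 2 := List.count_pos_iff.mpr hm
        simp only [Bool.not_true]
        rw [beq_eq_false_iff_ne]
        intro hzz
        rw [Int.natCast_eq_zero] at hzz
        omega
    rw [hmem, pv_nondec_eq]
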